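-- pv_equiv track=rewrite | github.com/TebanVe/FileMerger | src/structure_validator.py | _plural_singular_groups
-- ===== SOURCE A (Python) =====
-- from typing import List, Optional, Dict, Tuple
--
-- def _is_plural_singular_pair(a: str, b: str) -> bool:
--     """
--     Return True if one name is the other plus/minus trailing 's' or 'es'.
--     Used only for hint messages in validation reports.
--     """
--     if not a or not b:
--         return False
--     a, b = a.strip(), b.strip()
--     if a == b:
--         return False
--     if a == b + 's' or a + 's' == b:
--         return True
--     if a == b + 'es' or a + 'es' == b:
--         return True
--     if len(b) > 1 and b.endswith('s') and a == b[:-1]: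
--         return True
--     if len(a) > 1 and a.endswith('s') and b == a[:-1]:
--         return True
--     return False
--
-- def _plural_singular_groups(all_columns: List[str]) -> List[List[str]]:
--     """Partition column names into groups where names in a group are plural/singular of each other."""
--     all_columns = [str(c).strip() for c in all_columns if c and str(c).strip()]
--     groups: List[List[str]] = []
--     for name in all_columns:
--         found = False
--         for g in groups:
--             if any(_is_plural_singular_pair(name, x) for x in g):
--                 g.append(name)
--                 found = True
--                 break
--         if not found:
--             groups.append([name])
--     return groups
-- ===== SOURCE B (Python) =====
-- def _plural_singular_groups(all_columns):
--     """Partition column names into plural/singular groups via a name->group-index map (no rescans of groups)."""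
--     names = [str(c).strip() for c in all_columns if c and str(c).strip()]
--     groups = []
--     index = {}  # name -> smallest index of a group containing it
--     for name in names:
--         cands = [name + 's', name + 'es']
--         if len(name) >= 2 and name.endswith('s'):
--             cands.append(name[:-1])
--         if len(name) >= 3 and name.endswith('es'):
--             cands.append(name[:-2])
--         hits = [index[c] for c in cands if c in index]
--         if hits:
--             gi = min(hits)
--             groups[gi].append(name)
--         else:
--             gi = len(groups)
--             groups.append([name])
--         index[name] = min(index.get(name, gi), gi)
--     return groups
-- ===== Notes on version B (the rewrite author's own statement) =====
-- stated objective: faster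
-- what changed: A rescans every existing group member with the pair predicate for each new name; B keeps a dictionary from each seen name to the smallest index of a group containing it, computes the at-most-4 possible partner forms of the current name (name+'s', name+'es', name minus trailing 's', name minus trailing 'es') and joins the group with the minimal looked-up index, so the inner scan over all groups disappears.
import Mathlib
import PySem

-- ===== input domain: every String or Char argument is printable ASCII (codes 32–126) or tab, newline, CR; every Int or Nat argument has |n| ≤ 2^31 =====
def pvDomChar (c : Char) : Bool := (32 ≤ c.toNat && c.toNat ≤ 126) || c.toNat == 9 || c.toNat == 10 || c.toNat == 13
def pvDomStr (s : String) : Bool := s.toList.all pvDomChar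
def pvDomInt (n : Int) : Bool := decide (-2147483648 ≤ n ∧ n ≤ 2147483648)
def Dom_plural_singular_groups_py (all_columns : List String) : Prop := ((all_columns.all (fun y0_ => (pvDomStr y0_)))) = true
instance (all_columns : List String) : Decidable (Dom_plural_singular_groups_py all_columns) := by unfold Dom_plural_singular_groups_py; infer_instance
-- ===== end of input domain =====

-- B replaces A's rescan of every existing group by a name→(smallest group index) dictionary,
-- looking up the ≤4 possible partner forms of each name (objective: faster, O(n·L) vs O(n²·L)).

-- ===== PORT A =====
-- _is_plural_singular_pair, transliterated
def pvIsPluralSingularPair (a b : String) : Bool :=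
  if a = "" || b = "" then false
  else
    let a := PySem.Str.strip a
    let b := PySem.Str.strip b
    if a = b then false
    else if a = b ++ "s" || a ++ "s" = b then true
    else if a = b ++ "es" || a ++ "es" = b then true
    else if decide (1 < PySem.Str.len b) && PySem.Str.endswith b "s" && decide (a = PySem.Str.slice b none (some (-1))) then true
    else if decide (1 < PySem.Str.len a) && PySem.Str.endswith a "s" && decide (b = PySem.Str.slice a none (some (-1))) then true
    else false

-- the inner 'for g in groups: … append; break' loop of A
def pvAInsert (name : String) : List (List String) → Option (List (List String))
  | [] => none
  | g :: rest =>
    if g.any (fun x => pvIsPluralSingularPair name x) then some ((g ++ [name]) :: rest)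
    else (pvAInsert name rest).map (fun gs => g :: gs)

def plural_singular_groups_py (all_columns : List String) : List (List String) :=
  let cols := (all_columns.filter (fun c => !(c == "") && !(PySem.Str.strip c == ""))).map (fun c => PySem.Str.strip c)
  cols.foldl (fun groups name =>
    match pvAInsert name groups with
    | some gs => gs
    | none => groups ++ [[name]]) []

-- ===== PORT B =====
-- the ≤4 strings that can pair with name (Source B's cands list)
def pvCands (name : String) : List String :=
  let cs := [name ++ "s", name ++ "es"]
  let cs := if decide (2 ≤ PySem.Str.len name) && PySem.Str.endswith name "s" then cs ++ [PySem.Str.slice name none (some (-1))] else cs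
  if decide (3 ≤ PySem.Str.len name) && PySem.Str.endswith name "es" then cs ++ [PySem.Str.slice name none (some (-2))] else cs

-- one iteration of Source B's loop: state = (groups, index dict)
def pvBStep (st : List (List String) × PySem.Dict String Nat) (name : String) : List (List String) × PySem.Dict String Nat :=
  let hits := (pvCands name).filterMap (fun c => st.2.get? c)
  match PySem.List.min? hits (fun y => y) with
  | some gi => (st.1.modify gi (fun g => g ++ [name]), st.2.insert name (min (st.2.getD name gi) gi))
  | none =>
    let gi := st.1.length
    (st.1 ++ [[name]], st.2.insert name (min (st.2.getD name gi) gi))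

def plural_singular_groups_py_alt (all_columns : List String) : List (List String) :=
  let names := (all_columns.filter (fun c => !(c == "") && !(PySem.Str.strip c == ""))).map (fun c => PySem.Str.strip c)
  (names.foldl pvBStep ([], PySem.Dict.empty)).1

-- ===== PRECONDITION & SPEC =====
def Spec_plural_singular_groups_py (all_columns : List String) (out : List (List String)) : Prop := out = plural_singular_groups_py_alt all_columns
instance (all_columns : List String) (out : List (List String)) : Decidable (Spec_plural_singular_groups_py all_columns out) := by unfold Spec_plural_singular_groups_py; infer_instance

-- ===== CLAIM (what is proved, stated in full; the proofs are below) =====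
def Claim_equal_plural_singular_groups_py : Prop := ∀ (all_columns : List String), Dom_plural_singular_groups_py all_columns → Spec_plural_singular_groups_py all_columns (plural_singular_groups_py all_columns)

-- ===== LEMMAS AND PROOFS =====

-- a "clean" column name: nonempty and a fixed point of strip (every preprocessed name is one)
def pvOK (s : String) : Prop := ¬ s = "" ∧ PySem.Str.strip s = s

-- invariant of B: the dictionary maps every name to the index of the first group containing it
def pvInv (gs : List (List String)) (d : PySem.Dict String Nat) : Prop :=
  ∀ x : String, d.get? x = gs.findIdx? (fun g => g.contains x)

def pvGood (gs : List (List String)) : Prop := ∀ g ∈ gs, ∀ x ∈ g, pvOK x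

theorem pv_dropWhile_idem {α : Type} (p : α → Bool) (l : List α) :
    List.dropWhile p (List.dropWhile p l) = List.dropWhile p l := by
  rw [List.dropWhile_eq_self_iff]
  intro hl hp
  have := List.head?_dropWhile_not p l
  simp [List.head?_eq_getElem?, List.getElem?_eq_getElem hl] at this
  simp [this] at hp

theorem pv_min?_zero (l : List Nat) (h : 0 ∈ l) : PySem.List.min? l (fun y => y) = some 0 := by
  cases hm : PySem.List.min? l (fun y => y) with
  | none => rw [PySem.List.min?_eq_none_iff] at hm; simp [hm] at h
  | some m =>
    have := PySem.List.min?_isMin hm 0 h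
    simp at this; simp [this]

theorem pv_min?_map_succ (l : List Nat) :
    PySem.List.min? (l.map (fun x => x + 1)) (fun y => y) = (PySem.List.min? l (fun y => y)).map (fun x => x + 1) := by
  cases l with
  | nil => simp [(PySem.List.min?_eq_none_iff ([] : List Nat) _).mpr rfl]
  | cons x t =>
    rw [List.map_cons, PySem.List.min?_id_cons, PySem.List.min?_id_cons]
    simp only [Option.map_some]
    congr 1
    induction t generalizing x with
    | nil => rfl
    | cons a t ih => simp only [List.map_cons, List.foldl_cons, ← ih]; congr 1; omega

theorem pv_findIdx?_lt_length {α : Type} (p : α → Bool) (l : List α) (i : Nat)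
    (h : l.findIdx? p = some i) : i < l.length := by
  induction l generalizing i with
  | nil => simp at h
  | cons a t ih =>
    rw [List.findIdx?_cons] at h
    split at h
    · simp at h; simp [← h]
    · cases ht : t.findIdx? p with
      | none => simp [ht] at h
      | some j => simp [ht] at h; have := ih j ht; simp; omega

theorem pv_findIdx?_congr {α : Type} (p q : α → Bool) (l : List α) (h : ∀ x ∈ l, p x = q x) :
    l.findIdx? p = l.findIdx? q := by
  induction l with
  | nil => rfl
  | cons a t ih =>
    rw [List.findIdx?_cons, List.findIdx?_cons, h a (by simp), ih (fun x hx => h x (by simp [hx]))]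

theorem pv_findIdx?_modify_ne (gs : List (List String)) (j : Nat) (name x : String) (hx : ¬ x = name) :
    (gs.modify j (fun g => g ++ [name])).findIdx? (fun g => g.contains x) = gs.findIdx? (fun g => g.contains x) := by
  induction gs generalizing j with
  | nil => simp
  | cons g rest ih =>
    cases j with
    | zero =>
      rw [List.modify_zero_cons, List.findIdx?_cons, List.findIdx?_cons]
      have : (g ++ [name]).contains x = g.contains x := by
        simp [hx]
      rw [this]
    | succ j => rw [List.modify_succ_cons, List.findIdx?_cons, List.findIdx?_cons, ih j]

theorem pv_findIdx?_modify_self (gs : List (List String)) (j : Nat) (name : String) (hj : j < gs.length) :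
    (gs.modify j (fun g => g ++ [name])).findIdx? (fun g => g.contains name)
      = some (match gs.findIdx? (fun g => g.contains name) with | some i => min i j | none => j) := by
  induction gs generalizing j with
  | nil => simp at hj
  | cons g rest ih =>
    cases j with
    | zero =>
      rw [List.modify_zero_cons, List.findIdx?_cons]
      have : (g ++ [name]).contains name = true := by simp
      rw [this]
      simp only [if_true]
      rw [List.findIdx?_cons]
      by_cases hg : g.contains name = true
      · rw [if_pos hg]; simp
      · rw [if_neg hg]
        cases rest.findIdx? (fun g => g.contains name) <;> simp
    | succ j =>
      rw [List.modify_succ_cons, List.findIdx?_cons, List.findIdx?_cons]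
      by_cases hg : g.contains name = true
      · rw [hg]; simp
      · simp only [hg, if_false, Bool.false_eq_true]
        rw [ih j (by simp only [List.length_cons] at hj; omega)]
        cases rest.findIdx? (fun g => g.contains name) with
        | none => simp
        | some i => simp only [Option.map_some, Nat.succ_min_succ]

theorem pv_aInsert_eq (name : String) (gs : List (List String)) :
    pvAInsert name gs = (gs.findIdx? (fun g => g.any (fun x => pvIsPluralSingularPair name x))).map
      (fun j => gs.modify j (fun g => g ++ [name])) := by
  induction gs with
  | nil => simp [pvAInsert]
  | cons g rest ih =>
    rw [pvAInsert, List.findIdx?_cons]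
    by_cases hg : g.any (fun x => pvIsPluralSingularPair name x) = true
    · rw [if_pos hg, if_pos hg]; simp
    · rw [if_neg hg, if_neg hg, ih]
      cases rest.findIdx? (fun g => g.any (fun x => pvIsPluralSingularPair name x)) <;> simp

theorem pv_min_filterMap_findIdx (cs : List String) (gs : List (List String)) :
    PySem.List.min? (cs.filterMap (fun c => gs.findIdx? (fun g => g.contains c))) (fun y => y)
      = gs.findIdx? (fun g => cs.any (fun c => g.contains c)) := by
  induction gs with
  | nil =>
    simp only [List.findIdx?_nil]
    rw [List.filterMap_congr (g := fun _ => none) (by intro x _; simp), List.filterMap_none,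
      (PySem.List.min?_eq_none_iff _ _).mpr rfl]
  | cons g rest ih =>
    rw [List.findIdx?_cons]
    by_cases h : cs.any (fun c => g.contains c) = true
    · rw [if_pos h]
      apply pv_min?_zero
      obtain ⟨c, hc, hgc⟩ := List.any_eq_true.mp h
      refine List.mem_filterMap.mpr ⟨c, hc, ?_⟩
      rw [List.findIdx?_cons, if_pos hgc]
    · rw [if_neg h]
      have hcs : ∀ c ∈ cs, g.contains c = false := by
        intro c hc
        by_contra hb
        exact h (List.any_eq_true.mpr ⟨c, hc, by simpa using hb⟩)
      rw [List.filterMap_congr (g := fun c => (rest.findIdx? (fun g => g.contains c)).map (fun i => i + 1))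
            (by intro c hc; rw [List.findIdx?_cons, hcs c hc]; simp),
          ← List.map_filterMap, pv_min?_map_succ, ih]

theorem pv_chars_strip_idem (t : List Char) :
    PySem.Chars.strip (PySem.Chars.strip t) = PySem.Chars.strip t := by
  show PySem.Chars.rstrip (PySem.Chars.lstrip (PySem.Chars.rstrip (PySem.Chars.lstrip t)))
      = PySem.Chars.rstrip (PySem.Chars.lstrip t)
  set p := PySem.Chars.isspace
  set u := PySem.Chars.lstrip t with hu
  have hui : List.dropWhile p u = u := by
    rw [hu]; show List.dropWhile p (List.dropWhile p t) = _; rw [pv_dropWhile_idem]; rfl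
  have hls : PySem.Chars.lstrip (PySem.Chars.rstrip u) = PySem.Chars.rstrip u := by
    show List.dropWhile p (PySem.Chars.rstrip u) = PySem.Chars.rstrip u
    rw [List.dropWhile_eq_self_iff]
    intro hl hp
    have hpre : PySem.Chars.rstrip u <+: u := by
      have hsuf : List.dropWhile p u.reverse <:+ u.reverse := List.dropWhile_suffix p
      have := List.reverse_prefix.mpr hsuf
      simpa [PySem.Chars.rstrip] using this
    have hul : 0 < u.length := lt_of_lt_of_le hl hpre.length_le
    have hget : (PySem.Chars.rstrip u)[0] = u[0] := List.IsPrefix.getElem hpre hl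
    rw [List.dropWhile_eq_self_iff] at hui
    rw [hget] at hp
    exact hui hul hp
  rw [hls]
  show (List.dropWhile p ((List.dropWhile p u.reverse).reverse).reverse).reverse = _
  rw [List.reverse_reverse, pv_dropWhile_idem]
  rfl

theorem pv_strip_idem (s : String) : PySem.Str.strip (PySem.Str.strip s) = PySem.Str.strip s := by
  rw [← String.toList_inj, PySem.Str.toList_strip, PySem.Str.toList_strip, pv_chars_strip_idem]

theorem pv_concat_s_iff (A B : List Char) (hA : A ≠ []) :
    B = A ++ ['s'] ↔ (1 < B.length ∧ ['s'] <:+ B ∧ A = B.dropLast) := by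
  constructor
  · rintro rfl
    refine ⟨by simp; exact List.length_pos_iff.mpr hA, ⟨A, rfl⟩, by simp⟩
  · rintro ⟨hlen, ⟨t, rfl⟩, hdrop⟩
    simp only [List.dropLast_concat] at hdrop
    rw [hdrop]

theorem pv_concat_es_iff (A B : List Char) (hA : A ≠ []) :
    B = A ++ ['e','s'] ↔ (2 < B.length ∧ ['e','s'] <:+ B ∧ A = B.take (B.length - 2)) := by
  constructor
  · rintro rfl
    have hl : 0 < A.length := List.length_pos_iff.mpr hA
    refine ⟨by simp; omega, ⟨A, rfl⟩, ?_⟩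
    rw [List.length_append]
    simp only [List.length_cons, List.length_nil]
    rw [show A.length + (0 + 1 + 1) - 2 = A.length by omega, List.take_left]
  · rintro ⟨hlen, ⟨t, rfl⟩, htake⟩
    have : (t ++ ['e','s']).length - 2 = t.length := by simp
    rw [this, List.take_left] at htake
    rw [htake]

-- Str-level branch conditions, converted to toList form
theorem pv_cond_s_iff (a b : String) :
    (decide (1 < PySem.Str.len b) && PySem.Str.endswith b "s" && decide (a = PySem.Str.slice b none (some (-1)))) = true
      ↔ (1 < b.toList.length ∧ ['s'] <:+ b.toList ∧ a.toList = b.toList.dropLast) := by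
  rw [Bool.and_assoc]
  simp only [Bool.and_eq_true, decide_eq_true_eq, PySem.Str.len_eq,
    PySem.Str.endswith_eq, PySem.Chars.endswith_iff, ← String.toList_inj, PySem.Str.slice_to_neg_one]
  constructor
  · rintro ⟨h1, h2, h3⟩
    refine ⟨by exact_mod_cast h1, by simpa using h2, h3⟩
  · rintro ⟨h1, h2, h3⟩
    refine ⟨by exact_mod_cast h1, by simpa using h2, h3⟩

theorem pv_toList_slice_neg_two (s : String) :
    (PySem.Str.slice s none (some (-2))).toList = s.toList.take (s.toList.length - 2) := by
  rw [PySem.Str.toList_slice, PySem.Chars.slice_eq_listSlice]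
  rw [show ((-2 : Int)) = -((2:Nat) : Int) by norm_num]
  exact PySem.List.slice_to_neg_ofNat s.toList 2 (by omega)

theorem pv_pair_iff (a b : String) (ha : pvOK a) (hb : pvOK b) :
    pvIsPluralSingularPair a b = true ↔
      (a.toList = b.toList ++ ['s'] ∨ b.toList = a.toList ++ ['s'] ∨
       a.toList = b.toList ++ ['e','s'] ∨ b.toList = a.toList ++ ['e','s']) := by
  obtain ⟨ha1, ha2⟩ := ha
  obtain ⟨hb1, hb2⟩ := hb
  have hA : a.toList ≠ [] := by
    intro h; apply ha1; rw [← String.toList_inj, h]; rfl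
  have hB : b.toList ≠ [] := by
    intro h; apply hb1; rw [← String.toList_inj, h]; rfl
  rw [pvIsPluralSingularPair]
  simp only [ha1, hb1, decide_false, Bool.or_self, Bool.false_eq_true, if_false, ha2, hb2]
  by_cases hab : a = b
  · simp only [hab, if_true, Bool.false_eq_true, false_iff]
    rintro (h | h | h | h) <;> (apply_fun List.length at h; simp at h)
  · simp only [hab, if_false]
    have hs1 : ∀ u v : String, u = v ++ "s" → u.toList = v.toList ++ ['s'] := by
      intro u v h; rw [h, String.toList_append]; rfl
    have hs2 : ∀ u v : String, u.toList = v.toList ++ ['s'] → u = v ++ "s" := by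
      intro u v h; rw [← String.toList_inj, String.toList_append]; exact h
    have he1 : ∀ u v : String, u = v ++ "es" → u.toList = v.toList ++ ['e','s'] := by
      intro u v h; rw [h, String.toList_append]; rfl
    have he2 : ∀ u v : String, u.toList = v.toList ++ ['e','s'] → u = v ++ "es" := by
      intro u v h; rw [← String.toList_inj, String.toList_append]; exact h
    split_ifs with h1 h2 h3 h4
    · refine iff_of_true rfl ?_
      simp only [Bool.or_eq_true, decide_eq_true_eq] at h1
      rcases h1 with h | h
      · exact Or.inl (hs1 _ _ h)
      · exact Or.inr (Or.inl (hs1 _ _ h.symm))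
    · refine iff_of_true rfl ?_
      simp only [Bool.or_eq_true, decide_eq_true_eq] at h2
      rcases h2 with h | h
      · exact Or.inr (Or.inr (Or.inl (he1 _ _ h)))
      · exact Or.inr (Or.inr (Or.inr (he1 _ _ h.symm)))
    · refine iff_of_true rfl ?_
      rw [pv_cond_s_iff] at h3
      exact Or.inr (Or.inl ((pv_concat_s_iff _ _ hA).mpr h3))
    · refine iff_of_true rfl ?_
      rw [pv_cond_s_iff] at h4
      exact Or.inl ((pv_concat_s_iff _ _ hB).mpr h4)
    · refine iff_of_false (by simp) ?_
      rintro (h | h | h | h)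
      · exact h1 (by simp [hs2 _ _ h])
      · exact h1 (by simp [(hs2 _ _ h).symm])
      · exact h2 (by simp [he2 _ _ h])
      · exact h2 (by simp [(he2 _ _ h).symm])

set_option maxHeartbeats 1000000 in
theorem pv_mem_cands_iff (a b : String) (hb : ¬ b = "") :
    b ∈ pvCands a ↔
      (a.toList = b.toList ++ ['s'] ∨ b.toList = a.toList ++ ['s'] ∨
       a.toList = b.toList ++ ['e','s'] ∨ b.toList = a.toList ++ ['e','s']) := by
  have hB : b.toList ≠ [] := by intro h; apply hb; rw [← String.toList_inj, h]; rfl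
  have hs : ∀ u v : String, u = v ++ "s" ↔ u.toList = v.toList ++ ['s'] := by
    intro u v
    constructor
    · intro h; rw [h, String.toList_append]; rfl
    · intro h; rw [← String.toList_inj, String.toList_append]; exact h
  have hes : ∀ u v : String, u = v ++ "es" ↔ u.toList = v.toList ++ ['e','s'] := by
    intro u v
    constructor
    · intro h; rw [h, String.toList_append]; rfl
    · intro h; rw [← String.toList_inj, String.toList_append]; exact h
  have c3iff : (decide (2 ≤ PySem.Str.len a) && PySem.Str.endswith a "s") = true ↔ (1 < a.toList.length ∧ ['s'] <:+ a.toList) := by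
    simp only [Bool.and_eq_true, decide_eq_true_eq, PySem.Str.len_eq, PySem.Str.endswith_eq, PySem.Chars.endswith_iff]
    constructor
    · rintro ⟨h1, h2⟩; exact ⟨by exact_mod_cast h1, by simpa using h2⟩
    · rintro ⟨h1, h2⟩; exact ⟨by exact_mod_cast h1, by simpa using h2⟩
  have c4iff : (decide (3 ≤ PySem.Str.len a) && PySem.Str.endswith a "es") = true ↔ (2 < a.toList.length ∧ ['e','s'] <:+ a.toList) := by
    simp only [Bool.and_eq_true, decide_eq_true_eq, PySem.Str.len_eq, PySem.Str.endswith_eq, PySem.Chars.endswith_iff]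
    constructor
    · rintro ⟨h1, h2⟩; exact ⟨by exact_mod_cast h1, by simpa using h2⟩
    · rintro ⟨h1, h2⟩; exact ⟨by exact_mod_cast h1, by simpa using h2⟩
  have hslice1 : (b = PySem.Str.slice a none (some (-1))) ↔ b.toList = a.toList.dropLast := by
    rw [← String.toList_inj, PySem.Str.slice_to_neg_one]
  have hslice2 : (b = PySem.Str.slice a none (some (-2))) ↔ b.toList = a.toList.take (a.toList.length - 2) := by
    rw [← String.toList_inj, pv_toList_slice_neg_two]
  have d1 : ∀ (h3 : (decide (2 ≤ PySem.Str.len a) && PySem.Str.endswith a "s") = true),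
      (b = PySem.Str.slice a none (some (-1))) ↔ a.toList = b.toList ++ ['s'] := by
    intro h3
    rw [hslice1, pv_concat_s_iff _ _ hB]
    have := c3iff.mp h3
    constructor
    · intro h; exact ⟨this.1, this.2, h⟩
    · rintro ⟨_, _, h⟩; exact h
  have d2 : ∀ (h4 : (decide (3 ≤ PySem.Str.len a) && PySem.Str.endswith a "es") = true),
      (b = PySem.Str.slice a none (some (-2))) ↔ a.toList = b.toList ++ ['e','s'] := by
    intro h4
    rw [hslice2, pv_concat_es_iff _ _ hB]
    have := c4iff.mp h4
    constructor
    · intro h; exact ⟨this.1, this.2, h⟩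
    · rintro ⟨_, _, h⟩; exact h
  have n1 : ∀ (h3 : ¬ (decide (2 ≤ PySem.Str.len a) && PySem.Str.endswith a "s") = true),
      ¬ a.toList = b.toList ++ ['s'] := by
    intro h3 h
    obtain ⟨x1, x2, _⟩ := (pv_concat_s_iff _ _ hB).mp h
    exact h3 (c3iff.mpr ⟨x1, x2⟩)
  have n2 : ∀ (h4 : ¬ (decide (3 ≤ PySem.Str.len a) && PySem.Str.endswith a "es") = true),
      ¬ a.toList = b.toList ++ ['e','s'] := by
    intro h4 h
    obtain ⟨x1, x2, _⟩ := (pv_concat_es_iff _ _ hB).mp h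
    exact h4 (c4iff.mpr ⟨x1, x2⟩)
  rw [pvCands]
  split_ifs with h4 h3 h3
  · simp only [List.mem_append, List.mem_cons, List.not_mem_nil, or_false, or_assoc]
    rw [hs b a, hes b a, d1 h3, d2 h4]
    constructor
    · rintro (h | h | h | h)
      exacts [Or.inr (Or.inl h), Or.inr (Or.inr (Or.inr h)), Or.inl h, Or.inr (Or.inr (Or.inl h))]
    · rintro (h | h | h | h)
      exacts [Or.inr (Or.inr (Or.inl h)), Or.inl h, Or.inr (Or.inr (Or.inr h)), Or.inr (Or.inl h)]
  · simp only [List.mem_append, List.mem_cons, List.not_mem_nil, or_false, or_assoc]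
    rw [hs b a, hes b a, d2 h4]
    have hn1 := n1 h3
    constructor
    · rintro (h | h | h)
      exacts [Or.inr (Or.inl h), Or.inr (Or.inr (Or.inr h)), Or.inr (Or.inr (Or.inl h))]
    · rintro (h | h | h | h)
      exacts [absurd h hn1, Or.inl h, Or.inr (Or.inr h), Or.inr (Or.inl h)]
  · simp only [List.mem_append, List.mem_cons, List.not_mem_nil, or_false, or_assoc]
    rw [hs b a, hes b a, d1 h3]
    have hn2 := n2 h4
    constructor
    · rintro (h | h | h)
      exacts [Or.inr (Or.inl h), Or.inr (Or.inr (Or.inr h)), Or.inl h]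
    · rintro (h | h | h | h)
      exacts [Or.inr (Or.inr h), Or.inl h, absurd h hn2, Or.inr (Or.inl h)]
  · simp only [List.mem_cons, List.not_mem_nil, or_false]
    rw [hs b a, hes b a]
    have hn1 := n1 h3
    have hn2 := n2 h4
    constructor
    · rintro (h | h)
      exacts [Or.inr (Or.inl h), Or.inr (Or.inr (Or.inr h))]
    · rintro (h | h | h | h)
      exacts [absurd h hn1, Or.inl h, absurd h hn2, Or.inr h]

theorem pv_any_eq (name : String) (g : List String) (hn : pvOK name) (hg : ∀ x ∈ g, pvOK x) :
    g.any (fun x => pvIsPluralSingularPair name x) = (pvCands name).any (fun c => g.contains c) := by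
  rw [Bool.eq_iff_iff, List.any_eq_true, List.any_eq_true]
  constructor
  · rintro ⟨x, hx, hp⟩
    refine ⟨x, ?_, by simpa using hx⟩
    exact (pv_mem_cands_iff name x (hg x hx).1).mpr ((pv_pair_iff name x hn (hg x hx)).mp hp)
  · rintro ⟨c, hc, hcg⟩
    have hcg' : c ∈ g := by simpa using hcg
    exact ⟨c, hcg', (pv_pair_iff name c hn (hg c hcg')).mpr ((pv_mem_cands_iff name c (hg c hcg').1).mp hc)⟩

theorem pv_good_modify (gs : List (List String)) (j : Nat) (name : String)
    (hgs : pvGood gs) (hn : pvOK name) : pvGood (gs.modify j (fun g => g ++ [name])) := by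
  induction gs generalizing j with
  | nil => simpa using hgs
  | cons g rest ih =>
    cases j with
    | zero =>
      rw [List.modify_zero_cons]
      intro g' hg' x hx
      rcases List.mem_cons.mp hg' with hg1 | hg1
      · rcases List.mem_append.mp (hg1 ▸ hx) with h | h
        · exact hgs g (List.mem_cons_self (l := rest)) x h
        · rw [List.mem_singleton.mp h]; exact hn
      · exact hgs g' (List.mem_cons_of_mem g hg1) x hx
    | succ j =>
      rw [List.modify_succ_cons]
      intro g' hg' x hx
      rcases List.mem_cons.mp hg' with hg1 | hg1
      · exact hgs g (List.mem_cons_self (l := rest)) x (hg1 ▸ hx)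
      · exact ih j (fun g0 hg0 => hgs g0 (List.mem_cons_of_mem g hg0)) g' hg1 x hx

theorem pv_step (gs : List (List String)) (d : PySem.Dict String Nat) (name : String)
    (hInv : pvInv gs d) (hgs : pvGood gs) (hn : pvOK name) :
    (match pvAInsert name gs with
      | some gs' => gs'
      | none => gs ++ [[name]]) = (pvBStep (gs, d) name).1
    ∧ pvInv (pvBStep (gs, d) name).1 (pvBStep (gs, d) name).2
    ∧ pvGood (pvBStep (gs, d) name).1 := by
  have hmin : PySem.List.min? ((pvCands name).filterMap (fun c => d.get? c)) (fun y => y)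
      = gs.findIdx? (fun g => g.any (fun x => pvIsPluralSingularPair name x)) := by
    rw [List.filterMap_congr (fun c _ => hInv c), pv_min_filterMap_findIdx]
    exact (pv_findIdx?_congr _ _ _ (fun g hgmem => pv_any_eq name g hn (hgs g hgmem))).symm
  rw [pv_aInsert_eq]
  unfold pvBStep
  simp only [hmin]
  cases hF : gs.findIdx? (fun g => g.any (fun x => pvIsPluralSingularPair name x)) with
  | none =>
    simp only [Option.map_none]
    refine ⟨by trivial, ?_, ?_⟩
    · intro x
      by_cases hx : x = name
      · subst hx
        rw [PySem.Dict.get?_insert_self, List.findIdx?_append]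
        rw [PySem.Dict.getD_eq_get?_getD, hInv x]
        have hx0 : List.findIdx? (fun g => g.contains x) [[x]] = some 0 := by
          rw [List.findIdx?_cons]; simp
        rw [hx0]
        cases hN : gs.findIdx? (fun g => g.contains x) with
        | none => simp
        | some i =>
          have hilt := pv_findIdx?_lt_length _ _ _ hN
          simp [Nat.min_eq_left (Nat.le_of_lt hilt)]
      · rw [PySem.Dict.get?_insert_of_ne _ _ hx, List.findIdx?_append]
        have hx0 : List.findIdx? (fun g => g.contains x) [[name]] = none := by
          rw [List.findIdx?_cons]
          simp [hx]
        rw [hx0, hInv x]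
        cases gs.findIdx? (fun g => g.contains x) <;> simp
    · intro g' hg' x hx
      rcases List.mem_append.mp hg' with h | h
      · exact hgs g' h x hx
      · rw [List.mem_singleton.mp h] at hx
        rw [List.mem_singleton.mp hx]
        exact hn
  | some j =>
    have hjlt := pv_findIdx?_lt_length _ _ _ hF
    simp only [Option.map_some]
    refine ⟨by trivial, ?_, pv_good_modify gs j name hgs hn⟩
    intro x
    by_cases hx : x = name
    · subst hx
      rw [PySem.Dict.get?_insert_self, pv_findIdx?_modify_self gs j x hjlt]
      rw [PySem.Dict.getD_eq_get?_getD, hInv x]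
      cases hN : gs.findIdx? (fun g => g.contains x) with
      | none => simp
      | some i => simp
    · rw [PySem.Dict.get?_insert_of_ne _ _ hx, pv_findIdx?_modify_ne gs j name x hx, hInv x]

theorem pv_fold (names : List String) (gs : List (List String)) (d : PySem.Dict String Nat)
    (hInv : pvInv gs d) (hgs : pvGood gs) (hns : ∀ n ∈ names, pvOK n) :
    names.foldl (fun groups name =>
      match pvAInsert name groups with
      | some gs' => gs'
      | none => groups ++ [[name]]) gs = (names.foldl pvBStep (gs, d)).1 := by
  induction names generalizing gs d with
  | nil => rfl
  | cons n t ih =>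
    rw [List.foldl_cons, List.foldl_cons]
    obtain ⟨heq, hInv', hgs'⟩ := pv_step gs d n hInv hgs (hns n (by simp))
    rw [heq]
    have : pvBStep (gs, d) n = ((pvBStep (gs, d) n).1, (pvBStep (gs, d) n).2) := rfl
    rw [this] at *
    exact ih _ _ hInv' hgs' (fun m hm => hns m (by simp [hm]))

-- ===== VERDICT (by name: the statement is the Claim_ definition above) =====
theorem plural_singular_groups_py_spec : Claim_equal_plural_singular_groups_py := by
  intro all_columns _hdom
  show plural_singular_groups_py all_columns = plural_singular_groups_py_alt all_columns
  rw [plural_singular_groups_py, plural_singular_groups_py_alt]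
  refine pv_fold _ [] PySem.Dict.empty ?_ ?_ ?_
  · intro x; rw [PySem.Dict.get?_empty, List.findIdx?_nil]
  · intro g hg; simp at hg
  · intro n hn
    obtain ⟨c, hc, rfl⟩ := List.mem_map.mp hn
    have := List.of_mem_filter hc
    simp only [Bool.and_eq_true, Bool.not_eq_true'] at this
    refine ⟨?_, pv_strip_idem c⟩
    intro h
    have := this.2
    rw [h] at this
    simp at this
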